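-- pv_equiv track=rewrite | github.com/CharlotteJ232/Advent_of_code_2023 | day/1/p1.py | find_first_digit_in_line
-- ===== SOURCE A (Python) =====
-- DIGITS = "0123456789"
--
-- def find_first_digit_in_line(line, digit_words):
--     for index, character in enumerate(line):
--         if character in DIGITS:
--             return character
--         for key in digit_words.keys():
--             if character == key[0]:
--                 if key == line[index : index + len(key)]:
--                     return digit_words[key]
-- ===== SOURCE B (Python) =====
-- DIGITS = "0123456789"
--
-- def find_first_digit_in_line(line, digit_words):
--     best = None  # (first_index, value); earlier candidates win index ties
--     for digit in DIGITS:
--         i = line.find(digit)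
--         if i >= 0 and (best is None or i < best[0]):
--             best = (i, digit)
--     for key, value in digit_words.items():
--         i = line.find(key)
--         if i >= 0 and (best is None or i < best[0]):
--             best = (i, value)
--     return None if best is None else best[1]
-- ===== Notes on version B (the rewrite author's own statement) =====
-- stated objective: alternative
-- what changed: Replaces the single left-to-right per-position scan (with an inner key loop at every position) by per-candidate first-occurrence searches via str.find followed by a minimum-index selection, breaking index ties in favour of literal digits and then dict insertion order.
-- outside the precondition, e.g. on find_first_digit_in_line('', {'': '9'}): A returns None, B returns '9'; on find_first_digit_in_line('ab', {'a': '1', '': '9'}): A returns '1', B returns '1'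
import Mathlib
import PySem

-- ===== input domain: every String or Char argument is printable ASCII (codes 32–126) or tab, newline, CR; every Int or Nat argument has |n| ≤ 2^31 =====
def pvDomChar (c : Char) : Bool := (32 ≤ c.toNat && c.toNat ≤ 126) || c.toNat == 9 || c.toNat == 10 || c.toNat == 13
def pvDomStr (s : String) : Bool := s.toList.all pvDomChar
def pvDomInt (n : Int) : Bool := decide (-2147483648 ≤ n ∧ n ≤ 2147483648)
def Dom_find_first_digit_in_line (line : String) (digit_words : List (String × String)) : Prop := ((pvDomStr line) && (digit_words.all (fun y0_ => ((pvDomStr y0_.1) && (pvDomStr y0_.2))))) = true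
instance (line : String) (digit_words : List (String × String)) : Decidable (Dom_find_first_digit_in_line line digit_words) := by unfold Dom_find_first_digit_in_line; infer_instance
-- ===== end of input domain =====

-- B replaces A's left-to-right per-position scan by per-candidate first-occurrence
-- searches (str.find) plus a minimum-index selection (alternative decomposition, not
-- claimed faster). The equivalence is about the return value only (neither mutates).

-- ===== PORT A =====
-- DIGITS = "0123456789"; 'character in DIGITS' on a 1-char string is membership of the char.
def pvDIGITS : List Char := "0123456789".toList

-- inner loop: for key in digit_words.keys(): if character == key[0]: if key == line[index:index+len(key)]: return digit_words[key]
-- (keys of a Python dict are unique, so digit_words[key] is the value paired with key in items;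
--  key[0] on the empty key raises IndexError in Python — those inputs are excluded by Pre_ below)
def pvAInner (cs : List Char) (c : Char) (i : Nat) : List (String × String) → Option String
  | [] => none
  | (k, v) :: rest =>
    if k.toList.head? = some c then
      if k.toList = PySem.List.slice cs (some (i : Int)) (some ((i : Int) + (k.toList.length : Int))) then
        some v
      else pvAInner cs c i rest
    else pvAInner cs c i rest

-- outer loop: for index, character in enumerate(line)
def pvAScan (cs : List Char) (items : List (String × String)) : Nat → List Char → Option String
  | _, [] => none
  | i, c :: rest =>
    if pvDIGITS.contains c then some (String.ofList [c])
    else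
      match pvAInner cs c i items with
      | some v => some v
      | none => pvAScan cs items (i + 1) rest

def find_first_digit_in_line (line : String) (digit_words : List (String × String)) : Option String :=
  pvAScan line.toList (PySem.Dict.ofList digit_words).items 0 line.toList

-- ===== PORT B =====
-- if i >= 0 and (best is None or i < best[0]): best = (i, value)
def pvBetter (best : Option (Int × String)) (i : Int) (v : String) : Option (Int × String) :=
  match best with
  | none => if 0 ≤ i then some (i, v) else none
  | some b => if 0 ≤ i ∧ i < b.1 then some (i, v) else some b

-- return None if best is None else best[1]
def pvFinal (best : Option (Int × String)) : Option String :=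
  match best with
  | none => none
  | some b => some b.2

def find_first_digit_in_line_alt (line : String) (digit_words : List (String × String)) : Option String :=
  let cs := line.toList
  let best1 := pvDIGITS.foldl (fun best d => pvBetter best (PySem.Chars.find cs [d]) (String.ofList [d])) none
  let best2 := (PySem.Dict.ofList digit_words).items.foldl
      (fun best kv => pvBetter best (PySem.Chars.find cs kv.1.toList) kv.2) best1
  pvFinal best2

-- ===== PRECONDITION & SPEC =====
-- Pre_ excludes dicts containing the empty-string key, except when the line starts with a
-- literal digit (then A returns it before ever reading a key): with an empty key, A raises
-- IndexError (key[0]) as soon as the scan reaches a position that does not return earlier,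
-- and an empty key matches everywhere, a degenerate input for this function.
def Pre_find_first_digit_in_line (line : String) (digit_words : List (String × String)) : Prop :=
  (∀ p ∈ digit_words, p.1.toList ≠ []) ∨ (∃ c ∈ line.toList.take 1, pvDIGITS.contains c)
instance (line : String) (digit_words : List (String × String)) : Decidable (Pre_find_first_digit_in_line line digit_words) := by unfold Pre_find_first_digit_in_line; infer_instance

def pvWitness_find_first_digit_in_line : String × (List (String × String)) := ("xone2y", [("one", "1"), ("two", "2")])

def Spec_find_first_digit_in_line (line : String) (digit_words : List (String × String)) (out : Option String) : Prop := out = find_first_digit_in_line_alt line digit_words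
instance (line : String) (digit_words : List (String × String)) (out : Option String) : Decidable (Spec_find_first_digit_in_line line digit_words out) := by unfold Spec_find_first_digit_in_line; infer_instance

-- ===== CLAIM (what is proved, stated in full; the proofs are below) =====
def Claim_equal_find_first_digit_in_line : Prop := ∀ (line : String) (digit_words : List (String × String)), Dom_find_first_digit_in_line line digit_words → Pre_find_first_digit_in_line line digit_words → Spec_find_first_digit_in_line line digit_words (find_first_digit_in_line line digit_words)

-- ===== LEMMAS AND PROOFS =====

-- the candidate list B effectively folds over: ten digits, then the dict items
def pvCands (items : List (String × String)) : List (List Char × String) :=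
  pvDIGITS.map (fun d => ([d], String.ofList [d])) ++ items.map (fun kv => (kv.1.toList, kv.2))

-- first candidate (in candidate order) whose find-position is minimal and nonnegative
def pvBest (cs : List Char) : List (List Char × String) → Option (Int × String)
  | [] => none
  | pv :: L =>
    let i := PySem.Chars.find cs pv.1
    if 0 ≤ i then
      match pvBest cs L with
      | none => some (i, pv.2)
      | some b => if i ≤ b.1 then some (i, pv.2) else some b
    else pvBest cs L

def pvCombine (acc b : Option (Int × String)) : Option (Int × String) :=
  match acc, b with
  | none, b => b
  | some a, none => some a
  | some a, some b => if b.1 < a.1 then some b else some a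

theorem pvCombine_none (b : Option (Int × String)) : pvCombine none b = b := rfl
theorem pvCombine_some_none (a : Int × String) : pvCombine (some a) none = some a := rfl
theorem pvCombine_some_some (a b : Int × String) :
    pvCombine (some a) (some b) = if b.1 < a.1 then some b else some a := rfl

theorem pvFoldl_better_eq (cs : List Char) (L : List (List Char × String)) (acc : Option (Int × String)) :
    L.foldl (fun best pv => pvBetter best (PySem.Chars.find cs pv.1) pv.2) acc = pvCombine acc (pvBest cs L) := by
  induction L generalizing acc with
  | nil => cases acc <;> rfl
  | cons pv L ih =>
    rw [List.foldl_cons, ih]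
    cases acc <;> cases hL : pvBest cs L <;>
      simp [pvBetter, pvBest, hL]
    all_goals try split_ifs
    all_goals simp only [pvCombine_none, pvCombine_some_none, pvCombine_some_some]
    all_goals try split_ifs
    all_goals first | rfl | (exfalso; omega)

theorem pvAlt_eq_best (line : String) (digit_words : List (String × String)) :
    find_first_digit_in_line_alt line digit_words
      = Option.map (·.2) (pvBest line.toList (pvCands (PySem.Dict.ofList digit_words).items)) := by
  have h := pvFoldl_better_eq line.toList (pvCands (PySem.Dict.ofList digit_words).items) none
  have hc : ∀ x : Option (Int × String), pvCombine none x = x := fun x => by cases x <;> rfl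
  rw [hc] at h
  have hfin : ∀ x : Option (Int × String), pvFinal x = Option.map (·.2) x := fun x => by cases x <;> rfl
  calc find_first_digit_in_line_alt line digit_words
      = pvFinal ((pvCands (PySem.Dict.ofList digit_words).items).foldl
          (fun best pv => pvBetter best (PySem.Chars.find line.toList pv.1) pv.2) none) := by
        simp only [find_first_digit_in_line_alt, pvCands, List.foldl_append, List.foldl_map]
    _ = _ := by rw [h, hfin]

-- find-spec helpers
theorem pvFind_spec (cs sub : List Char) (h : 0 ≤ PySem.Chars.find cs sub) :
    sub <+: cs.drop (PySem.Chars.find cs sub).toNat ∧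
      ∀ i : Nat, i < (PySem.Chars.find cs sub).toNat → ¬ sub <+: cs.drop i := by
  have hs := PySem.Chars.findFrom_natCast_spec cs sub 0 (Nat.zero_le _) (by simp; omega)
  simp at hs
  exact ⟨hs.2.1, fun i hi => hs.2.2 i (by omega)⟩

theorem pvFind_nonneg_of_prefix (cs sub : List Char) (j : Nat) (h : sub <+: cs.drop j) :
    0 ≤ PySem.Chars.find cs sub := by
  rw [PySem.Chars.find_nonneg_iff, ← PySem.Chars.isIn_iff_infix, ← PySem.Chars.exists_prefix_drop_iff_isIn]
  exact ⟨j, h⟩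

-- every find-position of a candidate is ≥ i when nothing matches before i
theorem pvFind_ge (cs sub : List Char) (i : Nat) (hpos : 0 ≤ PySem.Chars.find cs sub)
    (H : ∀ j : Nat, j < i → ¬ sub <+: cs.drop j) : (i : Int) ≤ PySem.Chars.find cs sub := by
  by_contra hlt
  exact H (PySem.Chars.find cs sub).toNat (by omega) (pvFind_spec cs sub hpos).1

theorem pvFind_eq_of_prefix (cs sub : List Char) (i : Nat) (h : sub <+: cs.drop i)
    (H : ∀ j : Nat, j < i → ¬ sub <+: cs.drop j) : PySem.Chars.find cs sub = (i : Int) := by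
  have hpos := pvFind_nonneg_of_prefix cs sub i h
  have hge := pvFind_ge cs sub i hpos H
  have hmin := (pvFind_spec cs sub hpos).2
  by_contra hne
  exact hmin i (by omega) h

theorem pvBest_mem (cs : List Char) (L : List (List Char × String)) (b : Int × String)
    (h : pvBest cs L = some b) : 0 ≤ b.1 ∧ ∃ pv ∈ L, PySem.Chars.find cs pv.1 = b.1 := by
  induction L generalizing b with
  | nil => simp [pvBest] at h
  | cons pv L ih =>
    simp only [pvBest] at h
    split_ifs at h with h0
    · cases hL : pvBest cs L with
      | none =>
        simp only [hL] at h
        cases h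
        exact ⟨h0, pv, List.mem_cons_self, rfl⟩
      | some b' =>
        simp only [hL] at h
        split_ifs at h with h1
        · cases h
          exact ⟨h0, pv, List.mem_cons_self, rfl⟩
        · cases h
          obtain ⟨hb, q, hq, hfq⟩ := ih _ hL
          exact ⟨hb, q, List.mem_cons_of_mem _ hq, hfq⟩
    · obtain ⟨hb, q, hq, hfq⟩ := ih _ h
      exact ⟨hb, q, List.mem_cons_of_mem _ hq, hfq⟩

theorem pvBest_eq_none_iff (cs : List Char) (L : List (List Char × String)) :
    pvBest cs L = none ↔ ∀ pv ∈ L, ¬ 0 ≤ PySem.Chars.find cs pv.1 := by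
  induction L with
  | nil => simp [pvBest]
  | cons pv L ih =>
    simp only [pvBest]
    split_ifs with h0
    · constructor
      · intro h
        exfalso
        cases hL : pvBest cs L with
        | none => simp [hL] at h
        | some b' =>
          simp only [hL] at h
          split_ifs at h
      · intro h
        exact absurd h0 (h pv List.mem_cons_self)
    · rw [ih]
      constructor
      · intro h q hq
        rcases List.mem_cons.1 hq with rfl | hq'
        · exact h0
        · exact h q hq'
      · intro h q hq
        exact h q (List.mem_cons_of_mem _ hq)

-- when nothing matches before i, the first candidate matching at i is the overall best
theorem pvBest_of_find? (cs : List Char) (i : Nat) (L : List (List Char × String)) (pv₀ : List Char × String)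
    (H : ∀ pv ∈ L, ∀ j : Nat, j < i → ¬ pv.1 <+: cs.drop j)
    (h : L.find? (fun pv => pv.1.isPrefixOf (cs.drop i)) = some pv₀) :
    pvBest cs L = some ((i : Int), pv₀.2) := by
  induction L with
  | nil => simp at h
  | cons pv L ih =>
    have Htail : ∀ pv ∈ L, ∀ j : Nat, j < i → ¬ pv.1 <+: cs.drop j :=
      fun q hq => H q (List.mem_cons_of_mem _ hq)
    by_cases hp : pv.1.isPrefixOf (cs.drop i) = true
    · simp only [List.find?_cons, hp] at h
      injection h with h2
      subst h2
      have hpre : pv.1 <+: cs.drop i := List.isPrefixOf_iff_prefix.1 hp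
      have hfi : PySem.Chars.find cs pv.1 = (i : Int) :=
        pvFind_eq_of_prefix cs pv.1 i hpre (fun j hj => H pv List.mem_cons_self j hj)
      simp only [pvBest, hfi]
      rw [if_pos (by omega)]
      cases hL : pvBest cs L with
      | none => rfl
      | some b =>
        obtain ⟨hb, q, hq, hfq⟩ := pvBest_mem cs L b hL
        have hle : (i : Int) ≤ b.1 := hfq ▸ pvFind_ge cs q.1 i (by omega) (Htail q hq)
        show (if (i : Int) ≤ b.1 then some ((i : Int), pv.2) else some b) = some ((i : Int), pv.2)
        rw [if_pos hle]
    · have hp' : pv.1.isPrefixOf (cs.drop i) = false := Bool.eq_false_iff.2 hp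
      simp only [List.find?_cons, hp'] at h
      have hih := ih Htail h
      simp only [pvBest, hih]
      split_ifs with h0 h1
      · exfalso
        have hge := pvFind_ge cs pv.1 i h0 (fun j hj => H pv List.mem_cons_self j hj)
        have heq : PySem.Chars.find cs pv.1 = (i : Int) := by omega
        have hpre := (pvFind_spec cs pv.1 h0).1
        rw [heq] at hpre
        simp at hpre
        exact hp (List.isPrefixOf_iff_prefix.2 hpre)
      · rfl
      · rfl

-- A's (head, slice) test at a position equals the prefix test, for nonempty keys
theorem pvInner_eq_find? (cs : List Char) (c : Char) (i : Nat) (rest : List Char)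
    (hdrop : cs.drop i = c :: rest) (items : List (String × String))
    (hne : ∀ p ∈ items, p.1.toList ≠ []) :
    pvAInner cs c i items
      = Option.map (·.2) ((items.map (fun kv => (kv.1.toList, kv.2))).find?
          (fun pv => pv.1.isPrefixOf (cs.drop i))) := by
  induction items with
  | nil => simp [pvAInner]
  | cons kv rest' ih =>
    obtain ⟨k, v⟩ := kv
    have hk : k.toList ≠ [] := hne (k, v) List.mem_cons_self
    have hslice : (k.toList = PySem.List.slice cs (some (i : Int)) (some ((i : Int) + (k.toList.length : Int))))
        ↔ k.toList <+: cs.drop i := by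
      rw [PySem.List.slice_natCast_add]
      exact (List.prefix_iff_eq_take).symm
    have ih' := ih (fun p hp => hne p (List.mem_cons_of_mem _ hp))
    by_cases hp : k.toList <+: cs.drop i
    · have hb : k.toList.isPrefixOf (cs.drop i) = true := List.isPrefixOf_iff_prefix.2 hp
      have hh : k.toList.head? = some c := by
        rw [hdrop] at hp
        cases hkl : k.toList with
        | nil => exact absurd hkl hk
        | cons c' t =>
          rw [hkl] at hp
          obtain ⟨u, hu⟩ := hp
          cases hu
          rfl
      simp only [pvAInner, List.map_cons, List.find?_cons, hb]
      rw [if_pos hh, if_pos (hslice.2 hp)]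
      rfl
    · have hb : k.toList.isPrefixOf (cs.drop i) = false :=
        Bool.eq_false_iff.2 (fun hEq => hp (List.isPrefixOf_iff_prefix.1 hEq))
      simp only [pvAInner, List.map_cons, List.find?_cons, hb]
      by_cases hh : k.toList.head? = some c
      · rw [if_pos hh, if_neg (fun hEq => hp (hslice.1 hEq))]
        exact ih'
      · rw [if_neg hh]
        exact ih'

theorem pvDigits_find? (c : Char) (rest : List Char) (ds : List Char) :
    ((ds.map (fun d => ([d], String.ofList [d]))).find? (fun pv => pv.1.isPrefixOf (c :: rest)))
      = (if ds.contains c then some ([c], String.ofList [c]) else none) := by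
  induction ds with
  | nil => simp
  | cons d ds ih =>
    by_cases hdc : d = c
    · subst hdc
      simp [List.isPrefixOf]
    · have hcd : ¬c = d := fun hEq => hdc hEq.symm
      simp [List.isPrefixOf, hdc, hcd, ih]

theorem pvScan_eq_best (cs : List Char) (items : List (String × String))
    (hne : ∀ p ∈ items, p.1.toList ≠ []) (l : List Char) (i : Nat) (hdrop : cs.drop i = l)
    (H : ∀ pv ∈ pvCands items, ∀ j : Nat, j < i → ¬ pv.1 <+: cs.drop j) :
    pvAScan cs items i l = Option.map (·.2) (pvBest cs (pvCands items)) := by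
  have hpat : ∀ pv ∈ pvCands items, pv.1 ≠ [] := by
    intro pv hpv
    rcases List.mem_append.1 hpv with hd | hi
    · obtain ⟨d, _, rfl⟩ := List.mem_map.1 hd
      simp
    · obtain ⟨q, hq, rfl⟩ := List.mem_map.1 hi
      exact hne q hq
  induction l generalizing i with
  | nil =>
    simp only [pvAScan]
    symm
    rw [Option.map_eq_none_iff, pvBest_eq_none_iff]
    intro pv hpv hfind
    have hsp := pvFind_spec cs pv.1 hfind
    have hlen : PySem.Chars.find cs pv.1 ≤ (cs.length : Int) := PySem.Chars.find_le_length cs pv.1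
    have hle : cs.length ≤ i := by
      by_contra hlt
      have hx : cs.drop i ≠ [] := by simp; omega
      exact hx hdrop
    have hm : (PySem.Chars.find cs pv.1).toNat < i ∨ (PySem.Chars.find cs pv.1).toNat = cs.length := by omega
    rcases hm with hlt | heq
    · exact H pv hpv _ hlt hsp.1
    · have hpre := hsp.1
      rw [heq] at hpre
      simp at hpre
      exact hpat pv hpv hpre
  | cons c rest ihl =>
    simp only [pvAScan]
    by_cases hdig : pvDIGITS.contains c
    · rw [if_pos hdig]
      have hfc : (pvCands items).find? (fun pv => pv.1.isPrefixOf (cs.drop i)) = some ([c], String.ofList [c]) := by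
        rw [pvCands, List.find?_append, hdrop, pvDigits_find?, if_pos hdig]
        rfl
      rw [pvBest_of_find? cs i _ _ H hfc]
      rfl
    · rw [if_neg hdig]
      rw [pvInner_eq_find? cs c i rest hdrop items hne]
      cases hfi : (items.map (fun kv => (kv.1.toList, kv.2))).find? (fun pv => pv.1.isPrefixOf (cs.drop i)) with
      | some pv₀ =>
        have hfc : (pvCands items).find? (fun pv => pv.1.isPrefixOf (cs.drop i)) = some pv₀ := by
          rw [pvCands, List.find?_append, hdrop, pvDigits_find?, if_neg hdig, Option.none_or, ← hdrop, hfi]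
        show some pv₀.2 = Option.map (·.2) (pvBest cs (pvCands items))
        rw [pvBest_of_find? cs i _ _ H hfc]
        rfl
      | none =>
        have hnomatch : ∀ pv ∈ pvCands items, ¬ pv.1 <+: cs.drop i := by
          intro pv hpv
          have hfc : (pvCands items).find? (fun pv => pv.1.isPrefixOf (cs.drop i)) = none := by
            rw [pvCands, List.find?_append, hdrop, pvDigits_find?, if_neg hdig, Option.none_or, ← hdrop, hfi]
          have hnp := List.find?_eq_none.1 hfc pv hpv
          intro hpre
          exact hnp (List.isPrefixOf_iff_prefix.2 hpre)
        have hdrop' : cs.drop (i + 1) = rest := by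
          rw [← List.drop_drop, hdrop, List.drop_one, List.tail_cons]
        show pvAScan cs items (i + 1) rest = Option.map (·.2) (pvBest cs (pvCands items))
        exact ihl (i + 1) hdrop' (by
          intro pv hpv j hj
          rcases Nat.lt_succ_iff_lt_or_eq.1 hj with hlt | rfl
          · exact H pv hpv j hlt
          · exact hnomatch pv hpv)

theorem pvOfList_key_mem (dw : List (String × String)) (p : String × String)
    (h : p ∈ (PySem.Dict.ofList dw).items) : p.1 ∈ dw.map (·.1) := by
  have h2 : p.1 ∈ (PySem.Dict.ofList dw).keys := PySem.Dict.mem_keys_of_mem_items _ h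
  rw [show (PySem.Dict.ofList dw) = dw.foldl (fun d q => d.insert q.1 q.2) PySem.Dict.empty from rfl] at h2
  rw [PySem.Dict.keys_foldl_insert_key] at h2
  simpa [PySem.Dict.keys_empty] using ((PySem.Set.mem_update _ _ _).1 h2)

-- a line starting with a literal digit returns it in both programs, whatever the keys are
theorem pvDigit_first (c : Char) (rest : List Char) (items : List (String × String))
    (hdig : pvDIGITS.contains c) :
    pvAScan (c :: rest) items 0 (c :: rest) = Option.map (·.2) (pvBest (c :: rest) (pvCands items)) := by
  have hfc : (pvCands items).find? (fun pv => pv.1.isPrefixOf ((c :: rest).drop 0)) = some ([c], String.ofList [c]) := by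
    rw [List.drop_zero, pvCands, List.find?_append, pvDigits_find?, if_pos hdig]
    rfl
  rw [pvBest_of_find? (c :: rest) 0 _ _ (by intro pv _ j hj; omega) hfc]
  simp only [pvAScan]
  rw [if_pos hdig]
  rfl

-- ===== VERDICT (by name: the statement is the Claim_ definition above) =====
theorem find_first_digit_in_line_spec : Claim_equal_find_first_digit_in_line := by
  intro line dw _ hpre
  unfold Spec_find_first_digit_in_line
  rw [pvAlt_eq_best]
  unfold find_first_digit_in_line
  rcases hpre with hpre | hdig1
  · have hne : ∀ p ∈ (PySem.Dict.ofList dw).items, p.1.toList ≠ [] := by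
      intro p hp
      have hmem := pvOfList_key_mem dw p hp
      simp only [List.mem_map] at hmem
      obtain ⟨q, hq, hq1⟩ := hmem
      rw [← hq1]
      exact hpre q hq
    exact pvScan_eq_best line.toList _ hne line.toList 0 (by simp) (by intro pv _ j hj; omega)
  · obtain ⟨c, hc, hdigc⟩ := hdig1
    cases hcs : line.toList with
    | nil => rw [hcs] at hc; simp at hc
    | cons c' rest =>
      rw [hcs] at hc
      simp at hc
      subst hc
      exact hcs ▸ pvDigit_first c rest _ hdigc
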